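-- pv_equiv track=rewrite | github.com/Julia2300/composing_music_ml | 4_evaluation/evaluation_metrics.py | inter_onset_intervals
-- ===== SOURCE A (Python) =====
-- def inter_onset_intervals(positions_bar):
--     """
--     Calculate the onset intervals in a sequence of positions.
--
--     :param positions_bar: List of lists, where each list represents a bar and contains note positions
--     :return: List of onset intervals
--     """
--     onset_intervals = []
--     for i in range(len(positions_bar)):
--         positions = positions_bar[i]
--         for j in range(len(positions)-1):
--             onset_intervals.append(positions[j+1]-positions[j])
--         if i < len(positions_bar)-1 and len(positions_bar[i+1]) > 0 and len(positions) > 0: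
--             onset_intervals.append(positions_bar[i+1][0]-positions[-1]+16)
--     return onset_intervals
-- ===== SOURCE B (Python) =====
-- def inter_onset_intervals(positions_bar):
--     """Flatten each maximal run of consecutive non-empty bars onto an absolute
--     timeline (position + 16*bar_index) and take pairwise differences of the
--     flattened run; empty bars flush the run and break the chain."""
--     out = []
--     run = []  # absolute onset times of the current run of non-empty bars
--     for i, positions in enumerate(positions_bar):
--         if positions:
--             run += [p + 16 * i for p in positions]
--         else:
--             out += [t2 - t1 for t1, t2 in zip(run, run[1:])]
--             run = []
--     out += [t2 - t1 for t1, t2 in zip(run, run[1:])]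
--     return out
-- ===== Notes on version B (the rewrite author's own statement) =====
-- stated objective: alternative
-- what changed: B replaces A's per-bar index loop with look-ahead cross terms by flattening each maximal run of consecutive non-empty bars onto an absolute timeline (position + 16*bar_index) and taking pairwise differences of the flattened run at flush points (empty bar or end).
import Mathlib
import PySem

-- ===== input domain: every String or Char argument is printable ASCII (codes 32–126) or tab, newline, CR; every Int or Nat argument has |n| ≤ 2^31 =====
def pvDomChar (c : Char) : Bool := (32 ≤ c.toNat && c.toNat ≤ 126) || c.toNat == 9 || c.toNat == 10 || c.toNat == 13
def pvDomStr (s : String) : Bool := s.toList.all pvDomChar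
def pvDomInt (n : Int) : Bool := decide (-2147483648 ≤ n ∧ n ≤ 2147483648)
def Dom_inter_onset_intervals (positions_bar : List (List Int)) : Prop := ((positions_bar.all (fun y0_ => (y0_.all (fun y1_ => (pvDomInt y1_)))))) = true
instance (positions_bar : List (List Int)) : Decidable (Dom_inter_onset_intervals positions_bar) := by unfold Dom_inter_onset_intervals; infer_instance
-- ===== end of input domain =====

-- B flattens runs of consecutive non-empty bars onto an absolute timeline
-- (position + 16*bar_index) and diffs the flattened runs (alternative algorithm, same cost).

-- ===== PORT A =====
-- literal transliteration of A's index loops; all indices are in range, so pyGetD is exact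
def inter_onset_intervals (positions_bar : List (List Int)) : List Int :=
  (PySem.List.pyRange 0 positions_bar.length 1).foldl (fun acc i =>
    let positions := PySem.List.pyGetD positions_bar i []
    let acc2 := (PySem.List.pyRange 0 ((positions.length : Int) - 1) 1).foldl
      (fun a j => a ++ [PySem.List.pyGetD positions (j + 1) 0 - PySem.List.pyGetD positions j 0]) acc
    if i < (positions_bar.length : Int) - 1 ∧
        ((PySem.List.pyGetD positions_bar (i + 1) []).length > 0) ∧ (positions.length > 0) then
      acc2 ++ [PySem.List.pyGetD (PySem.List.pyGetD positions_bar (i + 1) []) 0 0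
               - PySem.List.pyGetD positions (-1) 0 + 16]
    else acc2) []

-- ===== PORT B =====
-- '[t2 - t1 for t1, t2 in zip(run, run[1:])]'
def pvDiffs (xs : List Int) : List Int :=
  (xs.zip xs.tail).map (fun ab => ab.2 - ab.1)

-- B's loop over enumerate(positions_bar), carrying the current run of absolute times;
-- an empty bar flushes the run's pairwise diffs to the output and resets it
def pvLoopB : List (List Int) → Int → List Int → List Int
  | [], _, run => pvDiffs run
  | p :: rest, i, run =>
    if p ≠ [] then pvLoopB rest (i + 1) (run ++ p.map (fun x => x + 16 * i))
    else pvDiffs run ++ pvLoopB rest (i + 1) []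

def inter_onset_intervals_alt (positions_bar : List (List Int)) : List Int :=
  pvLoopB positions_bar 0 []

-- ===== PRECONDITION & SPEC =====
def Spec_inter_onset_intervals (positions_bar : List (List Int)) (out : List Int) : Prop := out = inter_onset_intervals_alt positions_bar
instance (positions_bar : List (List Int)) (out : List Int) : Decidable (Spec_inter_onset_intervals positions_bar out) := by unfold Spec_inter_onset_intervals; infer_instance

-- ===== CLAIM (what is proved, stated in full; the proofs are below) =====
def Claim_equal_inter_onset_intervals : Prop := ∀ (positions_bar : List (List Int)), Dom_inter_onset_intervals positions_bar → Spec_inter_onset_intervals positions_bar (inter_onset_intervals positions_bar)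

-- ===== LEMMAS AND PROOFS =====

-- A's contribution for bar i, as one flat list: within-bar diffs ++ optional cross term
def pvCross (pb : List (List Int)) (i : Int) : List Int :=
  if i < (pb.length : Int) - 1 ∧ ((PySem.List.pyGetD pb (i + 1) []).length > 0) ∧
      ((PySem.List.pyGetD pb i []).length > 0) then
    [PySem.List.pyGetD (PySem.List.pyGetD pb (i + 1) []) 0 0
       - PySem.List.pyGetD (PySem.List.pyGetD pb i []) (-1) 0 + 16]
  else []

def pvG (pb : List (List Int)) (i : Int) : List Int :=
  (PySem.List.pyRange 0 (((PySem.List.pyGetD pb i []).length : Int) - 1) 1).map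
    (fun j => PySem.List.pyGetD (PySem.List.pyGetD pb i []) (j + 1) 0
              - PySem.List.pyGetD (PySem.List.pyGetD pb i []) j 0)
    ++ pvCross pb i

-- structural form of A's recurrence
def pvSpec : List (List Int) → List Int
  | [] => []
  | p :: rest =>
    pvDiffs p ++
      (match rest with
       | q :: _ => if p ≠ [] ∧ q ≠ [] then [q.headD 0 - p.getLastD 0 + 16] else []
       | [] => []) ++ pvSpec rest

lemma pvA_eq_flatMap (pb : List (List Int)) :
    inter_onset_intervals pb = (PySem.List.pyRange 0 pb.length 1).flatMap (pvG pb) := by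
  unfold inter_onset_intervals
  have hbody : (fun (acc : List Int) (i : Int) =>
      let positions := PySem.List.pyGetD pb i []
      let acc2 := (PySem.List.pyRange 0 ((positions.length : Int) - 1) 1).foldl
        (fun a j => a ++ [PySem.List.pyGetD positions (j + 1) 0 - PySem.List.pyGetD positions j 0]) acc
      if i < (pb.length : Int) - 1 ∧
          ((PySem.List.pyGetD pb (i + 1) []).length > 0) ∧ (positions.length > 0) then
        acc2 ++ [PySem.List.pyGetD (PySem.List.pyGetD pb (i + 1) []) 0 0
                 - PySem.List.pyGetD positions (-1) 0 + 16]
      else acc2) = fun acc i => acc ++ pvG pb i := by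
    funext acc i
    simp only [PySem.List.foldl_append_singleton_eq_map, pvG, pvCross]
    split_ifs <;> simp
  rw [hbody, PySem.List.foldl_append_eq_flatMap]
  simp

lemma pvDiffs_eq (p : List Int) :
    (PySem.List.pyRange 0 ((p.length : Int) - 1) 1).map
      (fun j => PySem.List.pyGetD p (j + 1) 0 - PySem.List.pyGetD p j 0) = pvDiffs p := by
  apply List.ext_getElem
  · simp [pvDiffs, PySem.List.length_pyRange_one]
  · intro k h1 h2
    have hk : k + 1 < p.length := by
      simp [PySem.List.length_pyRange_one] at h1
      omega
    rw [List.getElem_map, PySem.List.getElem_pyRange_one]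
    simp only [pvDiffs, List.getElem_map, List.getElem_zip, List.getElem_tail]
    rw [show (0 : Int) + (k : Int) + 1 = ((k + 1 : Nat) : Int) by push_cast; ring,
        show (0 : Int) + (k : Int) = ((k : Nat) : Int) by ring,
        PySem.List.pyGetD_natCast, PySem.List.pyGetD_natCast,
        List.getD_eq_getElem p 0 hk, List.getD_eq_getElem p 0 (by omega)]

lemma pvG_zero (p : List Int) (rest : List (List Int)) :
    pvG (p :: rest) 0 =
      pvDiffs p ++
        (match rest with
         | q :: _ => if p ≠ [] ∧ q ≠ [] then [q.headD 0 - p.getLastD 0 + 16] else []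
         | [] => []) := by
  have hb1 : PySem.List.pyGetD (p :: rest) ((0 : Int) + 1) [] = rest.getD 0 [] := by
    rw [show ((0 : Int) + 1) = ((1 : Nat) : Int) by norm_num, PySem.List.pyGetD_natCast]
    rfl
  unfold pvG pvCross
  rw [PySem.List.pyGetD_zero_cons, hb1, pvDiffs_eq]
  congr 1
  cases rest with
  | nil => simp
  | cons q r =>
    simp only [List.getD_cons_zero, List.length_cons]
    by_cases hp : p = []
    · subst hp; simp
    · by_cases hq : q = []
      · subst hq; simp
      · have hc : (0 : Int) < ((r.length + 1 + 1 : Nat) : Int) - 1 := by push_cast; omega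
        have hql : 0 < q.length := List.length_pos_iff.mpr hq
        have hpl : 0 < p.length := List.length_pos_iff.mpr hp
        rw [if_pos ⟨hc, hql, hpl⟩, if_pos ⟨hp, hq⟩]
        rw [PySem.List.pyGetD_zero, PySem.List.pyGetD_neg_one p 0 hp]
        cases q <;> simp_all [List.getLast?_eq_some_getLast hp]

lemma pvG_succ (p : List Int) (rest : List (List Int)) (k : Nat) :
    pvG (p :: rest) ((k : Int) + 1) = pvG rest (k : Int) := by
  have hbar : PySem.List.pyGetD (p :: rest) ((k : Int) + 1) [] = PySem.List.pyGetD rest (k : Int) [] := by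
    rw [show ((k : Int) + 1) = ((k + 1 : Nat) : Int) by push_cast; ring,
        PySem.List.pyGetD_natCast, PySem.List.pyGetD_natCast]
    rfl
  have hbar2 : PySem.List.pyGetD (p :: rest) ((k : Int) + 1 + 1) [] = PySem.List.pyGetD rest ((k : Int) + 1) [] := by
    rw [show ((k : Int) + 1 + 1) = ((k + 2 : Nat) : Int) by push_cast; ring,
        show ((k : Int) + 1) = ((k + 1 : Nat) : Int) by push_cast; ring,
        PySem.List.pyGetD_natCast, PySem.List.pyGetD_natCast]
    rfl
  unfold pvG pvCross
  rw [hbar, hbar2]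
  congr 1
  by_cases h : ((k : Int) < (rest.length : Int) - 1 ∧
      ((PySem.List.pyGetD rest ((k : Int) + 1) []).length > 0) ∧
      ((PySem.List.pyGetD rest (k : Int) []).length > 0))
  · rw [if_pos ⟨by simp; omega, h.2.1, h.2.2⟩, if_pos h]
  · rw [if_neg ?_ , if_neg h]
    intro hc
    exact h ⟨by have := hc.1; simp at this; omega, hc.2.1, hc.2.2⟩

lemma pvFlat_eq_spec (pb : List (List Int)) :
    (PySem.List.pyRange 0 pb.length 1).flatMap (pvG pb) = pvSpec pb := by
  induction pb with
  | nil => simp [pvSpec, PySem.List.pyRange_one_eq_nil]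
  | cons p rest ih =>
    have hcons : PySem.List.pyRange 0 ((p :: rest).length) 1 =
        0 :: PySem.List.pyRange 1 ((p :: rest).length) 1 := by
      apply PySem.List.pyRange_one_cons
      simp
    rw [hcons]
    simp only [List.flatMap_cons]
    have hshift : PySem.List.pyRange 1 ((p :: rest).length) 1 =
        (PySem.List.pyRange 0 (rest.length) 1).map (fun i => i + 1) := by
      rw [PySem.List.pyRange_one 1 ((p :: rest).length : Int),
          PySem.List.pyRange_one 0 (rest.length : Int)]
      have hl : (((p :: rest).length : Int) - 1).toNat = (((rest.length : Int)) - 0).toNat := by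
        simp
      rw [hl, List.map_map]
      exact List.map_congr_left (fun a _ => by simp; ring)
    rw [hshift, List.flatMap_map]
    have hmaps : ∀ i ∈ PySem.List.pyRange 0 (rest.length : Int) 1,
        pvG (p :: rest) (i + 1) = pvG rest i := by
      intro i hi
      rw [PySem.List.mem_pyRange_one] at hi
      obtain ⟨h0, _⟩ := hi
      obtain ⟨k, rfl⟩ : ∃ k : Nat, i = (k : Int) := ⟨i.toNat, by omega⟩
      exact pvG_succ p rest k
    rw [List.flatMap_congr hmaps, ih, pvG_zero]
    simp [pvSpec]

-- ===== B-side lemmas =====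

lemma pvDiffs_cons_cons (a b : Int) (l : List Int) :
    pvDiffs (a :: b :: l) = (b - a) :: pvDiffs (b :: l) := rfl

-- splitting a diff list at a concatenation point
lemma pvDiffs_append (run s : List Int) (hs : s ≠ []) :
    pvDiffs (run ++ s) =
      pvDiffs run ++
        (match run.getLast? with | some v => [s.headD 0 - v] | none => []) ++ pvDiffs s := by
  induction run with
  | nil => simp [pvDiffs]
  | cons a r ih =>
    cases r with
    | nil =>
      cases s with
      | nil => exact absurd rfl hs
      | cons b t => simp [pvDiffs]
    | cons c r' =>
      have h1 : (a :: c :: r') ++ s = a :: c :: (r' ++ s) := by simp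
      rw [h1, pvDiffs_cons_cons]
      have h2 : c :: (r' ++ s) = (c :: r') ++ s := by simp
      rw [h2, ih]
      simp [pvDiffs_cons_cons]

-- shifting all times by a constant leaves the diffs unchanged
lemma pvDiffs_map_add (p : List Int) (c : Int) :
    pvDiffs (p.map (fun x => x + c)) = pvDiffs p := by
  induction p with
  | nil => rfl
  | cons a r ih =>
    cases r with
    | nil => rfl
    | cons b t =>
      simp only [List.map_cons] at ih ⊢
      rw [pvDiffs_cons_cons, ih, pvDiffs_cons_cons]
      congr 1
      ring

lemma pvSpec_cons (p : List Int) (rest : List (List Int)) :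
    pvSpec (p :: rest) =
      pvDiffs p ++
        (match rest with
         | q :: _ => if p ≠ [] ∧ q ≠ [] then [q.headD 0 - p.getLastD 0 + 16] else []
         | [] => []) ++ pvSpec rest := rfl

-- the pending cross term carried by B's run buffer
def pvBridge (run : List Int) (pb : List (List Int)) (i : Int) : List Int :=
  match run.getLast?, pb with
  | some v, q :: _ => if q ≠ [] then [q.headD 0 + 16 * i - v] else []
  | _, _ => []

lemma pvLoopB_char (pb : List (List Int)) :
    ∀ (i : Int) (run : List Int),
      pvLoopB pb i run = pvDiffs run ++ pvBridge run pb i ++ pvSpec pb := by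
  induction pb with
  | nil => intro i run; simp [pvLoopB, pvBridge, pvSpec]
  | cons p rest ih =>
    intro i run
    by_cases hp : p = []
    · subst hp
      unfold pvLoopB
      rw [if_neg (fun h => h rfl), ih]
      have hb0 : pvBridge [] rest (i + 1) = [] := by cases rest <;> rfl
      have hbr : pvBridge run ([] :: rest) i = [] := by
        unfold pvBridge; cases run.getLast? <;> simp
      rw [hb0, hbr]
      cases rest <;> simp [pvDiffs, pvSpec]
    · simp only [pvLoopB, if_pos hp]
      rw [ih]
      have habs : p.map (fun x => x + 16 * i) ≠ [] := by
        simp [hp]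
      rw [pvDiffs_append run _ habs, pvDiffs_map_add]
      have hhead : (p.map (fun x => x + 16 * i)).headD 0 = p.headD 0 + 16 * i := by
        cases p with
        | nil => exact absurd rfl hp
        | cons a t => simp
      obtain ⟨v, hv⟩ : ∃ v, p.getLast? = some v := by
        cases hq : p.getLast? with
        | none => exact absurd (List.getLast?_eq_none_iff.mp hq) hp
        | some v => exact ⟨v, rfl⟩
      have hlast : (run ++ p.map (fun x => x + 16 * i)).getLast? =
          some (p.getLastD 0 + 16 * i) := by
        rw [List.getLast?_append, List.getLast?_map, hv]
        simp [List.getLastD_eq_getLast?, hv]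
      have hbridge : pvBridge (run ++ p.map (fun x => x + 16 * i)) rest (i + 1) =
          (match rest with
           | q :: _ => if p ≠ [] ∧ q ≠ [] then [q.headD 0 - p.getLastD 0 + 16] else []
           | [] => []) := by
        unfold pvBridge
        rw [hlast]
        cases rest with
        | nil => rfl
        | cons q r =>
          show (if q ≠ [] then [q.headD 0 + 16 * (i + 1) - (p.getLastD 0 + 16 * i)] else []) =
            (if p ≠ [] ∧ q ≠ [] then [q.headD 0 - p.getLastD 0 + 16] else [])
          by_cases hq : q = []
          · simp [hq]
          · rw [if_pos hq, if_pos ⟨hp, hq⟩]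
            congr 1
            ring
      rw [hbridge]
      have hbr : pvBridge run (p :: rest) i =
          (match run.getLast? with | some v => [p.headD 0 + 16 * i - v] | none => []) := by
        unfold pvBridge
        cases run.getLast? <;> simp [hp]
      rw [pvSpec_cons, hbr, hhead]
      simp
      cases rest <;> rfl

lemma pvB_eq_spec (pb : List (List Int)) : inter_onset_intervals_alt pb = pvSpec pb := by
  unfold inter_onset_intervals_alt
  rw [pvLoopB_char]
  have hb : pvBridge [] pb 0 = [] := by cases pb <;> rfl
  rw [hb]
  simp [pvDiffs]

-- ===== VERDICT (by name: the statement is the Claim_ definition above) =====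
theorem inter_onset_intervals_spec : Claim_equal_inter_onset_intervals := by
  intro pb _
  unfold Spec_inter_onset_intervals
  rw [pvA_eq_flatMap, pvFlat_eq_spec, pvB_eq_spec]
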